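-- pv_equiv track=rewrite | github.com/DrLizzard/goblin-graph-dungeon | goblin_graph_dungeon_v1.py | parse_choices
-- ===== SOURCE A (Python) =====
-- def parse_choices(inp: str, max_index: int):
--     picks = []
--     for part in inp.replace(",", " ").split():
--         if part.isdigit():
--             idx = int(part)
--             if 1 <= idx <= max_index:
--                 picks.append(idx)
--     # unique preserve order
--     seen = set()
--     out = []
--     for x in picks:
--         if x not in seen:
--             seen.add(x)
--             out.append(x)
--     return out
-- ===== SOURCE B (Python) =====
-- def parse_choices(inp: str, max_index: int):
--     # single character-level scan: tokenize by hand (comma or whitespace ends a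
--     # token), track whether the current token is all digits with a flag, and do
--     # the parse, range filter and order-preserving dedupe at each flush -- no
--     # replace(), no split(), no isdigit(), no intermediate picks list
--     out = []
--     seen = set()
--     tok = ""
--     ok = True
--     for ch in inp + ",":  # trailing sentinel separator flushes the last token
--         if ch == "," or ch.isspace():
--             if tok and ok:
--                 idx = int(tok)
--                 if 1 <= idx <= max_index and idx not in seen:
--                     seen.add(idx)
--                     out.append(idx)
--             tok, ok = "", True
--         else:
--             tok += ch
--             if not ("0" <= ch <= "9"):
--                 ok = False
--     return out
-- ===== Notes on version B (the rewrite author's own statement) =====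
-- stated objective: alternative
-- what changed: Replaces A's replace/split tokenization plus two sequential loops (filtered picks list, then seen-set dedupe) with a single hand-written character-level scanner that builds each token itself, tracks an all-digits flag, and parses, range-filters and dedupes at each separator flush.
import Mathlib
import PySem

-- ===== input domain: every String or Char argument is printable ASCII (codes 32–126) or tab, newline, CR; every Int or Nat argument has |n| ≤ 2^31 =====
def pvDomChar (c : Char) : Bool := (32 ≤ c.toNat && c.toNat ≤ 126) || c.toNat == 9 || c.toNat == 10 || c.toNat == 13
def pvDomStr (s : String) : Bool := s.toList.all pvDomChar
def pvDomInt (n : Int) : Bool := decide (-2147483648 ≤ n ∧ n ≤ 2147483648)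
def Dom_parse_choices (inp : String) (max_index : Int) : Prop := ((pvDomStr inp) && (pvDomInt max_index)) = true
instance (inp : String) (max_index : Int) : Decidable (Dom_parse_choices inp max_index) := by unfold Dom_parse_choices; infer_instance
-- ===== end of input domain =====

-- B replaces A's replace/split tokenization and its two sequential loops with a single
-- hand-written character-level scanner that builds each token itself, tracks an all-digits
-- flag, and parses, range-filters and dedupes at each separator flush (objective: alternative).

-- ===== PORT A =====
-- loop body of A's first loop: parse a token, keep it if a digit-string in [1, max_index]
def pvStepPick (max_index : Int) (picks : List Int) (part : String) : List Int :=
  if PySem.Str.strIsdigit part then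
    -- int(part): strIsdigit part = true guarantees ofStr? returns some, so getD 0 is never taken
    let idx := (PySem.Int.ofStr? part).getD 0
    if 1 ≤ idx ∧ idx ≤ max_index then picks ++ [idx] else picks
  else picks

-- loop body of A's second loop: order-preserving dedup with a seen set
def pvStepDedup (st : PySem.Set Int × List Int) (x : Int) : PySem.Set Int × List Int :=
  if x ∈ st.1 then st else (PySem.Set.add st.1 x, st.2 ++ [x])

def parse_choices (inp : String) (max_index : Int) : List Int :=
  let picks := (PySem.Str.split₀ (PySem.Str.replace inp "," " ")).foldl (pvStepPick max_index) []
  (picks.foldl pvStepDedup (PySem.Set.empty, [])).2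

-- ===== PORT B =====
-- loop body of B's single scan; state = (out, seen, tok, ok); c == ',' / ch.isspace() /
-- '0' <= ch <= '9' are ported as the literal character tests B makes
def pvScanStep (max_index : Int)
    (st : List Int × PySem.Set Int × List Char × Bool) (c : Char) :
    List Int × PySem.Set Int × List Char × Bool :=
  if c = ',' ∨ PySem.Chars.isspace c then
    let st' :=
      if st.2.2.1 ≠ [] ∧ st.2.2.2 = true then
        let idx := (PySem.Int.ofChars? st.2.2.1).getD 0
        if 1 ≤ idx ∧ idx ≤ max_index ∧ idx ∉ st.2.1 then
          (st.1 ++ [idx], PySem.Set.add st.2.1 idx)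
        else (st.1, st.2.1)
      else (st.1, st.2.1)
    (st'.1, st'.2, ([] : List Char), true)
  else
    (st.1, st.2.1, st.2.2.1 ++ [c], st.2.2.2 && (decide ('0' ≤ c) && decide (c ≤ '9')))

def parse_choices_alt (inp : String) (max_index : Int) : List Int :=
  ((inp.toList ++ [',']).foldl (pvScanStep max_index) ([], PySem.Set.empty, [], true)).1

-- ===== PRECONDITION & SPEC =====
def Spec_parse_choices (inp : String) (max_index : Int) (out : List Int) : Prop := out = parse_choices_alt inp max_index
instance (inp : String) (max_index : Int) (out : List Int) : Decidable (Spec_parse_choices inp max_index out) := by unfold Spec_parse_choices; infer_instance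

-- ===== CLAIM (what is proved, stated in full; the proofs are below) =====
def Claim_equal_parse_choices : Prop := ∀ (inp : String) (max_index : Int), Dom_parse_choices inp max_index → Spec_parse_choices inp max_index (parse_choices inp max_index)

-- ===== LEMMAS AND PROOFS =====

-- the character map performed by inp.replace(",", " ")
def pvF (c : Char) : Char := if c = ',' then ' ' else c

-- one token's worth of A's work, fused: parse/filter + dedupe, over (out, seen)
def pvTok (max_index : Int) (st : List Int × PySem.Set Int) (t : List Char) :
    List Int × PySem.Set Int :=
  if PySem.Chars.strIsdigit t then
    let idx := (PySem.Int.ofChars? t).getD 0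
    if 1 ≤ idx ∧ idx ≤ max_index ∧ idx ∉ st.2 then (st.1 ++ [idx], PySem.Set.add st.2 idx)
    else st
  else st

-- replacing the single char ',' by ' ' is the map pvF
lemma pvReplace_go (l acc : List Char) (fuel : Nat) (h : l.length ≤ fuel) :
    PySem.Chars.replace.go [','] [' '] fuel l acc = acc.reverse ++ l.map pvF := by
  induction l generalizing fuel acc with
  | nil => cases fuel <;> simp [PySem.Chars.replace.go]
  | cons c t ih =>
    cases fuel with
    | zero => simp at h
    | succ fuel =>
      simp only [PySem.Chars.replace.go, List.isPrefixOf, Bool.and_true, List.length_cons,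
        List.length_nil, Nat.zero_add, List.drop_one, List.tail_cons, List.reverse_cons,
        List.reverse_nil, List.nil_append]
      by_cases hc : c = ','
      · rw [if_pos (by simp [hc])]
        rw [ih _ fuel (by simpa using h)]
        simp [pvF, hc]
      · rw [if_neg (by simp [Ne.symm hc])]
        rw [ih _ fuel (by simpa using h)]
        simp [pvF, hc]

lemma pvReplace (s : List Char) :
    PySem.Chars.replace s [','] [' '] = s.map pvF := by
  simpa using pvReplace_go s [] s.length le_rfl

-- split₀.go pulls its accumulator out front
lemma pvSplitGo_acc (cs : List Char) (cur : List Char) (acc : List (List Char)) :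
    PySem.Chars.split₀.go cs cur acc = acc.reverse ++ PySem.Chars.split₀.go cs cur [] := by
  induction cs generalizing cur acc with
  | nil =>
    simp only [PySem.Chars.split₀.go]
    by_cases h : cur.isEmpty <;> simp [h]
  | cons c cs ih =>
    simp only [PySem.Chars.split₀.go]
    by_cases hs : PySem.Chars.isspace c
    · by_cases he : cur.isEmpty
      · simp only [hs, he, if_true]; exact ih [] acc
      · simp only [hs, he, if_true, Bool.false_eq_true, if_false]
        rw [ih [] (cur.reverse :: acc), ih [] [cur.reverse]]
        simp
    · simp only [hs, Bool.false_eq_true, if_false]; exact ih (c :: cur) acc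

-- pvF turns separator detection into B's test
lemma pvIsspace_pvF (c : Char) :
    PySem.Chars.isspace (pvF c) = (decide (c = ',') || PySem.Chars.isspace c) := by
  by_cases hc : c = ','
  · subst hc; simp [pvF]; decide
  · simp [pvF, hc]

-- A's two sequential loops over tokens equal one fused fold pvTok (seen ↔ out invariant)
lemma pvStepPick_acc (m : Int) (ts : List String) (acc : List Int) :
    ts.foldl (pvStepPick m) acc = acc ++ ts.foldl (pvStepPick m) [] := by
  induction ts generalizing acc with
  | nil => simp
  | cons t ts ih =>
    simp only [List.foldl_cons]
    rw [ih, ih (pvStepPick m [] t)]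
    simp [pvStepPick]
    split_ifs <;> simp

lemma pvFuse (m : Int) (ts : List String) (seen : PySem.Set Int) (out : List Int)
    (h : ∀ x : Int, x ∈ seen ↔ x ∈ out) :
    ((ts.foldl (pvStepPick m) []).foldl pvStepDedup (seen, out)).2
      = (ts.foldl (fun st s => pvTok m st s.toList) (out, seen)).1 := by
  induction ts generalizing seen out with
  | nil => simp
  | cons t ts ih =>
    simp only [List.foldl_cons]
    rw [pvStepPick_acc, List.foldl_append]
    by_cases hd : PySem.Chars.strIsdigit t.toList = true
    · by_cases hr : 1 ≤ (PySem.Int.ofChars? t.toList).getD 0 ∧ (PySem.Int.ofChars? t.toList).getD 0 ≤ m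
      · have hp : pvStepPick m [] t = [(PySem.Int.ofChars? t.toList).getD 0] := by
          simp [pvStepPick, PySem.Str.strIsdigit_eq, hd, PySem.Int.ofStr?, hr]
        by_cases hmem : (PySem.Int.ofChars? t.toList).getD 0 ∈ out
        · have hb : pvTok m (out, seen) t.toList = (out, seen) := by
            simp only [pvTok, hd, if_true]
            rw [if_neg (fun hc => hc.2.2 ((h _).2 hmem))]
          have hst : pvStepDedup (seen, out) ((PySem.Int.ofChars? t.toList).getD 0) = (seen, out) := by
            simp [pvStepDedup, (h _).2 hmem]
          rw [hp]
          simp only [List.foldl_cons, List.foldl_nil, hst, hb]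
          exact ih seen out h
        · have hns : (PySem.Int.ofChars? t.toList).getD 0 ∉ seen := fun hc => hmem ((h _).1 hc)
          have hb : pvTok m (out, seen) t.toList
              = (out ++ [(PySem.Int.ofChars? t.toList).getD 0],
                 PySem.Set.add seen ((PySem.Int.ofChars? t.toList).getD 0)) := by
            simp [pvTok, hd, hr.1, hr.2, hns]
          have hst : pvStepDedup (seen, out) ((PySem.Int.ofChars? t.toList).getD 0)
              = (PySem.Set.add seen ((PySem.Int.ofChars? t.toList).getD 0),
                 out ++ [(PySem.Int.ofChars? t.toList).getD 0]) := by
            simp [pvStepDedup, hns]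
          rw [hp]
          simp only [List.foldl_cons, List.foldl_nil, hst, hb]
          exact ih _ _ (by intro x; simp [PySem.Set.mem_add, h x])
      · have hp : pvStepPick m [] t = [] := by
          simp only [pvStepPick, PySem.Str.strIsdigit_eq, hd, if_true]
          rw [if_neg (by simpa [PySem.Int.ofStr?] using hr)]
        have hb : pvTok m (out, seen) t.toList = (out, seen) := by
          simp only [pvTok, hd, if_true]
          rw [if_neg (fun hc => hr ⟨hc.1, hc.2.1⟩)]
        rw [hp, hb]
        simpa using ih seen out h
    · have hp : pvStepPick m [] t = [] := by
        simp only [pvStepPick, PySem.Str.strIsdigit_eq]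
        rw [if_neg hd]
      have hb : pvTok m (out, seen) t.toList = (out, seen) := by
        simp only [pvTok]
        rw [if_neg hd]
      rw [hp, hb]
      simpa using ih seen out h

-- the flush a separator triggers in B, as a function (used to state the simulation)
def pvFlushFn (m : Int) (out : List Int) (seen : PySem.Set Int) (tok : List Char) :
    List Int × PySem.Set Int :=
  if tok ≠ [] ∧ tok.all PySem.Chars.isdigit = true then
    let idx := (PySem.Int.ofChars? tok).getD 0
    if 1 ≤ idx ∧ idx ≤ m ∧ idx ∉ seen then (out ++ [idx], PySem.Set.add seen idx)
    else (out, seen)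
  else (out, seen)

-- a nonempty flushed token behaves exactly like one step of A's fused token fold
lemma pvFlush (m : Int) (tok : List Char) (out : List Int) (seen : PySem.Set Int)
    (hne : tok ≠ []) :
    pvTok m (out, seen) tok = pvFlushFn m out seen tok := by
  have hdig : PySem.Chars.strIsdigit tok = tok.all PySem.Chars.isdigit := by
    simp [PySem.Chars.strIsdigit, hne]
  simp only [pvTok, pvFlushFn, hdig, hne, ne_eq, not_false_eq_true, true_and]

-- one separator step of B's scan is a flush
lemma pvStep_sep (m : Int) (c : Char) (out : List Int) (seen : PySem.Set Int)
    (tok : List Char) (b : Bool) (hsep : c = ',' ∨ PySem.Chars.isspace c) :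
    pvScanStep m (out, seen, tok, b) c
      = (let f := if tok ≠ [] ∧ b = true then
           let idx := (PySem.Int.ofChars? tok).getD 0
           if 1 ≤ idx ∧ idx ≤ m ∧ idx ∉ seen then (out ++ [idx], PySem.Set.add seen idx)
           else (out, seen)
         else (out, seen)
         (f.1, f.2, ([] : List Char), true)) := by
  simp only [pvScanStep, if_pos hsep]

-- the main simulation: A's fused token fold over split₀ of the comma-mapped characters
-- equals B's single scan over the raw characters plus the sentinel separator
lemma pvScan (m : Int) (cs : List Char) (tok : List Char) (out : List Int) (seen : PySem.Set Int) :
    (PySem.Chars.split₀.go (cs.map pvF) tok.reverse []).foldl (pvTok m) (out, seen)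
      = (((cs ++ [',']).foldl (pvScanStep m) (out, seen, tok, tok.all PySem.Chars.isdigit)).1,
         ((cs ++ [',']).foldl (pvScanStep m) (out, seen, tok, tok.all PySem.Chars.isdigit)).2.1) := by
  induction cs generalizing tok out seen with
  | nil =>
    simp only [List.map_nil, List.nil_append, List.foldl_cons, List.foldl_nil,
      pvStep_sep m ',' out seen tok _ (Or.inl rfl)]
    by_cases he : tok = []
    · simp [PySem.Chars.split₀.go, he]
    · have hgo : PySem.Chars.split₀.go [] tok.reverse [] = [tok] := by
        simp [PySem.Chars.split₀.go, List.isEmpty_iff, he]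
      rw [hgo]
      simp only [List.foldl_cons, List.foldl_nil]
      rw [pvFlush m tok out seen he, pvFlushFn]
  | cons c cs ih =>
    by_cases hsep : c = ',' ∨ PySem.Chars.isspace c
    · have hf : PySem.Chars.isspace (pvF c) = true := by
        rw [pvIsspace_pvF]
        rcases hsep with h1 | h1 <;> simp [h1]
      simp only [List.map_cons, PySem.Chars.split₀.go, hf, if_true, List.cons_append,
        List.foldl_cons, pvStep_sep m c out seen tok _ hsep]
      by_cases he : tok = []
      · have hemp : (tok.reverse).isEmpty = true := by simp [he]
        simp only [hemp, if_true]
        simpa [he] using ih [] out seen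
      · have hemp : (tok.reverse).isEmpty = false := by simp [List.isEmpty_iff, he]
        simp only [hemp, Bool.false_eq_true, if_false, List.reverse_reverse]
        rw [pvSplitGo_acc _ [] [tok]]
        simp only [List.reverse_cons, List.reverse_nil, List.nil_append, List.singleton_append,
          List.foldl_cons]
        rw [pvFlush m tok out seen he, pvFlushFn]
        simp only [ne_eq, he, not_false_eq_true, true_and]
        exact ih [] _ _
    · push_neg at hsep
      have hc : c ≠ ',' := hsep.1
      have hf : pvF c = c := by simp [pvF, hc]
      have hsp : PySem.Chars.isspace c = false := by
        cases hx : PySem.Chars.isspace c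
        · rfl
        · exact absurd hx hsep.2
      have hstep : pvScanStep m (out, seen, tok, tok.all PySem.Chars.isdigit) c
          = (out, seen, tok ++ [c], (tok ++ [c]).all PySem.Chars.isdigit) := by
        simp [pvScanStep, hc, hsp, PySem.Chars.isdigit, Bool.and_comm]
      simp only [List.map_cons, hf, PySem.Chars.split₀.go, hsp, Bool.false_eq_true, if_false,
        List.cons_append, List.foldl_cons, hstep]
      have hrev : c :: tok.reverse = (tok ++ [c]).reverse := by simp
      rw [hrev]
      exact ih (tok ++ [c]) out seen

-- ===== VERDICT (by name: the statement is the Claim_ definition above) =====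
theorem parse_choices_spec : Claim_equal_parse_choices := by
  intro inp m _
  unfold Spec_parse_choices parse_choices parse_choices_alt
  rw [pvFuse m _ PySem.Set.empty [] (by simp [PySem.Set.empty])]
  rw [← List.foldl_map]
  have hts : (PySem.Str.split₀ (PySem.Str.replace inp "," " ")).map String.toList
      = PySem.Chars.split₀ ((inp.toList).map pvF) := by
    rw [PySem.Str.split₀_map_toList]
    congr 1
    rw [PySem.Str.toList_replace]
    simpa using pvReplace inp.toList
  rw [hts]
  have := pvScan m inp.toList [] [] PySem.Set.empty
  simp only [List.reverse_nil, List.all_nil] at this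
  rw [show PySem.Chars.split₀ (inp.toList.map pvF) = PySem.Chars.split₀.go (inp.toList.map pvF) [] [] from rfl]
  rw [this]
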